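-- pv_equiv track=rewrite | github.com/luandnh/CodeLearnTraining.Python | equalString.py | equalString
-- ===== SOURCE A (Python) =====
-- def equalString(a, b, c):
--     ListA = list(a)
--     ListB = list(b)
--     ListC = list(c)
--     lenght= len(ListA)
--     for i in range(lenght):
--         if ListA[i] == ListB[i]:
--             continue
--         elif ListA[i] != ListB[i]:
--             if ListA[i] == ListC[i]:
--                 tmp = ListB[i]
--                 ListB[i] = ListC[i]
--                 ListC[i] = tmp
--             else:
--                 tmp = ListA[i]
--                 ListA[i] = ListC[i]
--                 ListC[i] = tmp
--     return ListA == ListB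
-- ===== SOURCE B (Python) =====
-- def equalString(a, b, c):
--     return len(a) == len(b) and all(
--         a[i] == b[i] or a[i] == c[i] or b[i] == c[i]
--         for i in range(len(a)))
-- ===== Notes on version B (the rewrite author's own statement) =====
-- stated objective: simpler
-- what changed: Replaces A's in-place swap simulation over three mutable lists with a pure per-position predicate: positions are independent and the final ListA==ListB holds at i iff at least two of a[i],b[i],c[i] are equal, plus an up-front length check.
import Mathlib
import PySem

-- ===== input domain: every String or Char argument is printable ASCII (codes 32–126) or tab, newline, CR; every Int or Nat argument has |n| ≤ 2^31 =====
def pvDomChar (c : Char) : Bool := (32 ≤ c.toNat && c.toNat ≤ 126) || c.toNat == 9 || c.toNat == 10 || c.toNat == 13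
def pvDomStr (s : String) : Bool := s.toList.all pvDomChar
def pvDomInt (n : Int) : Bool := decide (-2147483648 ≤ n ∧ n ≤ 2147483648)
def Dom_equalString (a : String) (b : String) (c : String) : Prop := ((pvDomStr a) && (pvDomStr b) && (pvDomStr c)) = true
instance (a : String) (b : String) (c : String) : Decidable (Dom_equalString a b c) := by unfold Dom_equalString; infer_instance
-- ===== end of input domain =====

-- B replaces A's in-place swap simulation by a pure per-position two-of-three-equal predicate plus a length check (objective: simpler).


-- ===== PORT A =====
-- one loop iteration of A: at index i, if ListA[i]==ListB[i] continue, else swap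
-- ListB[i]↔ListC[i] when ListA[i]==ListC[i], otherwise ListA[i]↔ListC[i].
-- Indexing uses getD ' '; inside Pre_equalString every index A touches is in range,
-- so this is exact there (out of range, Python raises IndexError instead).
def pvStepA (s : List Char × List Char × List Char) (i : Nat) : List Char × List Char × List Char :=
  if s.1.getD i ' ' = s.2.1.getD i ' ' then s
  else if s.1.getD i ' ' = s.2.2.getD i ' ' then
    (s.1, s.2.1.set i (s.2.2.getD i ' '), s.2.2.set i (s.2.1.getD i ' '))
  else
    (s.1.set i (s.2.2.getD i ' '), s.2.1, s.2.2.set i (s.1.getD i ' '))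

def equalString (a : String) (b : String) (c : String) : Bool :=
  let st := (List.range a.toList.length).foldl pvStepA (a.toList, b.toList, c.toList)
  st.1 == st.2.1

-- ===== PORT B =====
-- len(a)==len(b) and all(a[i]==b[i] or a[i]==c[i] or b[i]==c[i] for i in range(len(a)))
def equalString_alt (a : String) (b : String) (c : String) : Bool :=
  a.toList.length == b.toList.length &&
    (List.range a.toList.length).all (fun i =>
      a.toList.getD i ' ' == b.toList.getD i ' ' ||
      a.toList.getD i ' ' == c.toList.getD i ' ' ||
      b.toList.getD i ' ' == c.toList.getD i ' ')

-- ===== PRECONDITION & SPEC =====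
-- Pre_ excludes exactly the inputs where Python A raises IndexError: b shorter than a,
-- or some mismatch position at or beyond the length of c.
def Pre_equalString (a : String) (b : String) (c : String) : Prop :=
  a.toList.length ≤ b.toList.length ∧
  ∀ i < a.toList.length, a.toList.getD i ' ' ≠ b.toList.getD i ' ' → i < c.toList.length
instance (a : String) (b : String) (c : String) : Decidable (Pre_equalString a b c) := by
  unfold Pre_equalString; infer_instance

def pvWitness_equalString : String × String × String := ("abc", "axc", "xbx")

def Spec_equalString (a : String) (b : String) (c : String) (out : Bool) : Prop := out = equalString_alt a b c
instance (a : String) (b : String) (c : String) (out : Bool) : Decidable (Spec_equalString a b c out) := by unfold Spec_equalString; infer_instance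

-- ===== CLAIM (what is proved, stated in full; the proofs are below) =====
def Claim_equal_equalString : Prop := ∀ (a : String) (b : String) (c : String), Dom_equalString a b c → Pre_equalString a b c → Spec_equalString a b c (equalString a b c)
-- ===== LEMMAS AND PROOFS =====

-- "at position j at least two of the three original characters agree"
def pvTwoOf (la lb lc : List Char) (j : Nat) : Prop :=
  la.getD j ' ' = lb.getD j ' ' ∨ la.getD j ' ' = lc.getD j ' ' ∨ lb.getD j ' ' = lc.getD j ' '

theorem getD_set_ne (xs : List Char) (i j : Nat) (v : Char) (h : i ≠ j) :
    (xs.set i v).getD j ' ' = xs.getD j ' ' := by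
  simp [List.getD, List.getElem?_set_ne h]

theorem getD_set_self (xs : List Char) (i : Nat) (v : Char) (h : i < xs.length) :
    (xs.set i v).getD i ' ' = v := by
  simp [List.getD, h]

theorem pvInvA (la lb lc : List Char) (i : Nat) :
    ((List.range i).foldl pvStepA (la, lb, lc)).1.length = la.length ∧
    ((List.range i).foldl pvStepA (la, lb, lc)).2.1.length = lb.length ∧
    (∀ j, i ≤ j →
      ((List.range i).foldl pvStepA (la, lb, lc)).1.getD j ' ' = la.getD j ' ' ∧
      ((List.range i).foldl pvStepA (la, lb, lc)).2.1.getD j ' ' = lb.getD j ' ' ∧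
      ((List.range i).foldl pvStepA (la, lb, lc)).2.2.getD j ' ' = lc.getD j ' ') ∧
    (∀ j, j < i → j < la.length → j < lb.length →
      (((List.range i).foldl pvStepA (la, lb, lc)).1.getD j ' ' =
       ((List.range i).foldl pvStepA (la, lb, lc)).2.1.getD j ' ' ↔ pvTwoOf la lb lc j)) := by
  induction i with
  | zero => simp
  | succ i ih =>
    obtain ⟨h1, h2, hge, hlt⟩ := ih
    set st := (List.range i).foldl pvStepA (la, lb, lc) with hst
    have hstep : (List.range (i+1)).foldl pvStepA (la, lb, lc) = pvStepA st i := by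
      rw [List.range_succ, List.foldl_append]; rfl
    obtain ⟨ea, eb, ec⟩ := hge i (le_refl i)
    rw [hstep]
    unfold pvStepA
    rw [ea, eb, ec]
    by_cases hab : la.getD i ' ' = lb.getD i ' '
    · rw [if_pos hab]
      refine ⟨h1, h2, ?_, ?_⟩
      · intro j hj; exact hge j (by omega)
      · intro j hj hja hjb
        rcases Nat.lt_succ_iff_lt_or_eq.mp hj with h | h
        · exact hlt j h hja hjb
        · subst h
          obtain ⟨ua, ub, uc⟩ := hge j (le_refl j)
          rw [hab] at ua
          rw [ua, ub]
          exact ⟨fun _ => Or.inl hab, fun _ => rfl⟩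
    · rw [if_neg ?hneg]
      case hneg => exact hab
      by_cases hac : la.getD i ' ' = lc.getD i ' '
      · rw [if_pos hac]
        refine ⟨h1, by simpa using h2, ?_, ?_⟩
        · intro j hj
          have hne : i ≠ j := by omega
          refine ⟨(hge j (by omega)).1, ?_, ?_⟩
          · rw [getD_set_ne _ _ _ _ hne]; exact (hge j (by omega)).2.1
          · rw [getD_set_ne _ _ _ _ hne]; exact (hge j (by omega)).2.2
        · intro j hj hja hjb
          rcases Nat.lt_succ_iff_lt_or_eq.mp hj with h | h
          · have hne : i ≠ j := by omega
            rw [getD_set_ne _ _ _ _ hne]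
            exact hlt j h hja hjb
          · subst h
            rw [getD_set_self _ _ _ (by omega : j < st.2.1.length), (hge j (le_refl j)).1]
            exact ⟨fun _ => Or.inr (Or.inl hac), fun _ => hac⟩
      · rw [if_neg hac]
        refine ⟨by simpa using h1, h2, ?_, ?_⟩
        · intro j hj
          have hne : i ≠ j := by omega
          refine ⟨?_, (hge j (by omega)).2.1, ?_⟩
          · rw [getD_set_ne _ _ _ _ hne]; exact (hge j (by omega)).1
          · rw [getD_set_ne _ _ _ _ hne]; exact (hge j (by omega)).2.2
        · intro j hj hja hjb
          rcases Nat.lt_succ_iff_lt_or_eq.mp hj with h | h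
          · have hne : i ≠ j := by omega
            rw [getD_set_ne _ _ _ _ hne]
            exact hlt j h hja hjb
          · subst h
            rw [getD_set_self _ _ _ (by omega : j < st.1.length), (hge j (le_refl j)).2.1]
            unfold pvTwoOf
            constructor
            · intro h; exact Or.inr (Or.inr h.symm)
            · rintro (h | h | h)
              · exact absurd h hab
              · exact absurd h hac
              · exact h.symm

theorem pvListEq (la lb lc : List Char) :
    ((((List.range la.length).foldl pvStepA (la, lb, lc)).1 ==
      ((List.range la.length).foldl pvStepA (la, lb, lc)).2.1) : Bool) =
    ((la.length == lb.length) &&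
      (List.range la.length).all (fun i =>
        la.getD i ' ' == lb.getD i ' ' || la.getD i ' ' == lc.getD i ' ' ||
        lb.getD i ' ' == lc.getD i ' ')) := by
  obtain ⟨h1, h2, hge, hlt⟩ := pvInvA la lb lc la.length
  set st := (List.range la.length).foldl pvStepA (la, lb, lc) with hst
  by_cases hl : la.length = lb.length
  · have key : st.1 = st.2.1 ↔ ∀ j < la.length, pvTwoOf la lb lc j := by
      constructor
      · intro h j hj
        exact (hlt j hj hj (hl ▸ hj)).mp (by rw [h])
      · intro h
        apply List.ext_getElem?
        intro n
        by_cases hn : n < la.length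
        · rw [List.getElem?_eq_getElem (by omega), List.getElem?_eq_getElem (by omega)]
          have := (hlt n hn hn (hl ▸ hn)).mpr (h n hn)
          rw [List.getD_eq_getElem _ ' ' (by omega), List.getD_eq_getElem _ ' ' (by omega)] at this
          rw [this]
        · rw [List.getElem?_eq_none (by omega), List.getElem?_eq_none (by omega)]
    rw [Bool.eq_iff_iff]
    simp only [hl, beq_self_eq_true, Bool.true_and, beq_iff_eq, List.all_eq_true,
      List.mem_range, Bool.or_eq_true]
    rw [key, hl]
    constructor
    · intro h j hj; have := h j hj; unfold pvTwoOf at this; tauto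
    · intro h j hj; have := h j hj; unfold pvTwoOf; tauto
  · have hne : st.1 ≠ st.2.1 := fun h => hl (by rw [← h1, ← h2, h])
    rw [beq_eq_false_iff_ne.mpr hne, beq_eq_false_iff_ne.mpr hl, Bool.false_and]

-- ===== VERDICT (by name: the statement is the Claim_ definition above) =====
theorem equalString_spec : Claim_equal_equalString := by
  intro a b c _ _
  unfold Spec_equalString equalString equalString_alt
  exact pvListEq a.toList b.toList c.toList
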